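-- pv_equiv track=rewrite | github.com/dov/etherkey | gtk-kvm-client/ether-key-client.py | char_encode
-- ===== SOURCE A (Python) =====
-- def char_encode(line):
--   ret = ''
--   for ch in line:
--     if ch == ' ':
--       ret += '{space}'
--     elif ch == '\n':
--       ret += '{Enter}'
--     elif ch in '!@#$%^&*(){}[]/?=+\'",<.>\\':
--       ret += '{'+ch+'}'
--     else:
--       ret += ch
--   return ret
-- ===== SOURCE B (Python) =====
-- def char_encode(line):
--   table = {' ': '{space}', '\n': '{Enter}'}
--   for ch in '!@#$%^&*(){}[]/?=+\'",<.>\\':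
--     table[ch] = '{' + ch + '}'
--   return line.translate({ord(k): v for k, v in table.items()})
-- ===== Notes on version B (the rewrite author's own statement) =====
-- stated objective: idiomatic
-- what changed: Replaces the per-character if/elif chain with a replacement table built once and a single str.translate call (table-driven C-level pass instead of Python-level branching and string concatenation).
import Mathlib
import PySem

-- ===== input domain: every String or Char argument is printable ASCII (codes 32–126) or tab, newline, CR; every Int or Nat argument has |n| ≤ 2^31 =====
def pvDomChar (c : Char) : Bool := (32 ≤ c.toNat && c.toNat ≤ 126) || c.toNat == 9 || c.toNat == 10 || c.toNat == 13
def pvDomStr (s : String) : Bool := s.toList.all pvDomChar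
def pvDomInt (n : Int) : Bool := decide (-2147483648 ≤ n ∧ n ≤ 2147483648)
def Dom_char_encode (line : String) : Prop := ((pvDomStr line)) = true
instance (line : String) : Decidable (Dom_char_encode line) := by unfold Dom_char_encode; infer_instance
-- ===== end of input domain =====

-- B replaces A's per-character if/elif chain by a replacement table built once and a
-- single table-driven pass (str.translate); same return value, idiomatic objective.

-- ===== PORT A =====
def pvSpecials : List Char := "!@#$%^&*(){}[]/?=+'\",<.>\\".toList

-- one iteration of A's loop body: the string appended to ret for ch
-- ('ch in <str>' for a one-character ch is substring search: PySem.Chars.isIn [ch] …)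
def pvStepA (ch : Char) : List Char :=
  if ch = ' ' then "{space}".toList
  else if ch = '\n' then "{Enter}".toList
  else if PySem.Chars.isIn [ch] pvSpecials then '{' :: ch :: ['}']
  else [ch]

def char_encode (line : String) : String :=
  String.ofList (line.toList.foldl (fun ret ch => ret ++ pvStepA ch) [])

-- ===== PORT B =====
-- the replacement table: {' ': '{space}', '\n': '{Enter}'} extended by the loop over specials
def pvTable : PySem.Dict Char (List Char) :=
  pvSpecials.foldl (fun d ch => d.insert ch ('{' :: ch :: ['}']))
    (((PySem.Dict.empty).insert ' ' "{space}".toList).insert '\n' "{Enter}".toList)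

-- str.translate: each character is replaced by its table entry, unmapped characters kept
def char_encode_alt (line : String) : String :=
  String.ofList (line.toList.flatMap (fun ch => pvTable.getD ch [ch]))

-- ===== PRECONDITION & SPEC =====
def Spec_char_encode (line : String) (out : String) : Prop := out = char_encode_alt line
instance (line : String) (out : String) : Decidable (Spec_char_encode line out) := by unfold Spec_char_encode; infer_instance

-- ===== CLAIM (what is proved, stated in full; the proofs are below) =====
def Claim_equal_char_encode : Prop := ∀ (line : String), Dom_char_encode line → Spec_char_encode line (char_encode line)

-- ===== LEMMAS AND PROOFS =====

-- 'ch in s' for a single character is membership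
lemma pv_isIn_singleton (ch : Char) (l : List Char) :
    PySem.Chars.isIn [ch] l = l.contains ch := by
  rcases h : l.contains ch with _ | _
  · rw [PySem.Chars.isIn_eq_false_iff]
    intro hinf
    have := hinf.subset (List.mem_singleton_self ch)
    simp_all
  · rw [PySem.Chars.isIn_iff_infix]
    have hm : ch ∈ l := by simpa using h
    obtain ⟨s, t, rfl⟩ := List.mem_iff_append.mp hm
    exact ⟨s, t, by simp⟩

-- an insert loop over keys not containing ch leaves ch's lookup unchanged
lemma pv_getD_foldl_not_mem (ch : Char) (f : Char → List Char) (dft : List Char)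
    (l : List Char) (d : PySem.Dict Char (List Char)) (h : ch ∉ l) :
    (l.foldl (fun d c => d.insert c (f c)) d).getD ch dft = d.getD ch dft := by
  induction l generalizing d with
  | nil => rfl
  | cons c t ih =>
    simp only [List.foldl_cons]
    rw [ih _ (by simp_all), PySem.Dict.getD_insert_of_ne _ _ _ (by simp_all)]

-- an insert loop over keys containing ch makes ch's lookup f ch
lemma pv_getD_foldl_mem (ch : Char) (f : Char → List Char) (dft : List Char)
    (l : List Char) (d : PySem.Dict Char (List Char)) (h : ch ∈ l) :
    (l.foldl (fun d c => d.insert c (f c)) d).getD ch dft = f ch := by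
  induction l generalizing d with
  | nil => simp at h
  | cons c t ih =>
    simp only [List.foldl_cons]
    by_cases ht : ch ∈ t
    · exact ih _ ht
    · have : ch = c := by simp_all
      subst this
      rw [pv_getD_foldl_not_mem ch f dft t _ ht, PySem.Dict.getD_insert_self]

-- A's branch for ch produces exactly B's table lookup (with default ch)
lemma pvStep_eq (ch : Char) : pvStepA ch = pvTable.getD ch [ch] := by
  unfold pvStepA pvTable
  rw [pv_isIn_singleton]
  by_cases hm : ch ∈ pvSpecials
  · rw [pv_getD_foldl_mem ch _ _ _ _ hm]
    have h1 : ch ≠ ' ' := by rintro rfl; revert hm; decide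
    have h2 : ch ≠ '\n' := by rintro rfl; revert hm; decide
    simp [h1, h2]
    exact hm
  · rw [pv_getD_foldl_not_mem ch _ _ _ _ hm]
    by_cases h1 : ch = ' '
    · subst h1
      rw [PySem.Dict.getD_insert_of_ne _ _ _ (by decide), PySem.Dict.getD_insert_self]
      simp
    · by_cases h2 : ch = '\n'
      · subst h2; rw [PySem.Dict.getD_insert_self]; simp
      · rw [PySem.Dict.getD_insert_of_ne _ _ _ h2,
            PySem.Dict.getD_insert_of_ne _ _ _ h1, PySem.Dict.getD_empty]
        simp [h1, h2]
        exact hm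

-- ===== VERDICT (by name: the statement is the Claim_ definition above) =====
theorem char_encode_spec : Claim_equal_char_encode := by
  intro line _
  unfold Spec_char_encode char_encode char_encode_alt
  rw [PySem.List.foldl_append_eq_flatMap]
  simp only [← pvStep_eq, List.nil_append]
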